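-- pv_equiv track=rewrite | github.com/lasq88/CTF | justCTF2020/notcrypto/deobf.py | deaccumulate
-- ===== SOURCE A (Python) =====
-- def deaccumulate(s):
--     s = s[::-1]
--     r = []
--     for i in range(0,len(s)):
--         if i == len(s)-1:
--             r.append(s[i])
--         else:
--             r.append(s[i] - s[i + 1])
--     return r[::-1]
-- ===== SOURCE B (Python) =====
-- def deaccumulate(s):
--     shifted = [0] + s[:-1]
--     return [a - b for a, b in zip(s, shifted)]
-- ===== Notes on version B (the rewrite author's own statement) =====
-- stated objective: idiomatic
-- what changed: B has no index loop and no reversal at all: it builds a shifted copy of s (a zero followed by s without its last element) and returns the elementwise zip-subtraction of s with it, whereas A walks a reversed copy by index with a special-cased last element and reverses the buffer back.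
import Mathlib
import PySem

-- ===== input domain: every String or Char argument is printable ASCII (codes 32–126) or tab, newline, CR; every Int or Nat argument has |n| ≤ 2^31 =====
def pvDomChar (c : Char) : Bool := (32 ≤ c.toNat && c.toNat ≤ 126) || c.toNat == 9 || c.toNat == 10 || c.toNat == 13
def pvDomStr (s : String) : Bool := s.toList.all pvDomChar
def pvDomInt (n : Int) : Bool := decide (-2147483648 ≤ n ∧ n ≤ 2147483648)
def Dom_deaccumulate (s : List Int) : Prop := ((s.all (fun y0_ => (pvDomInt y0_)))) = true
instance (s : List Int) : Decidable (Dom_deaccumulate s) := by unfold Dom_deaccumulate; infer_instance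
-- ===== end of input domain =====

-- B replaces A's reverse / index-loop / reverse-again pipeline with a zip: it pairs s with
-- its shifted copy [0]+s[:-1] and subtracts elementwise — no index arithmetic, no reversal.

-- ===== PORT A =====
-- A: s = s[::-1]; loop i in range(len(s)) appending s[i] at the last index, else s[i]-s[i+1];
-- return r[::-1].  Indices i and i+1 are always in range, so pyGetD with default 0 is exact.
def deaccumulate (s : List Int) : List Int :=
  let t := (PySem.List.slice? s none none (-1)).getD []
  let r := (PySem.List.pyRange 0 t.length 1).foldl
    (fun r i =>
      if i = (t.length : Int) - 1 then r ++ [PySem.List.pyGetD t i 0]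
      else r ++ [PySem.List.pyGetD t i 0 - PySem.List.pyGetD t (i + 1) 0]) []
  (PySem.List.slice? r none none (-1)).getD []

-- ===== PORT B =====
-- B: shifted = [0] + s[:-1]; return [a - b for a, b in zip(s, shifted)]  (zip truncates).
def deaccumulate_alt (s : List Int) : List Int :=
  let shifted := 0 :: PySem.List.slice s none (some (-1))
  List.zipWith (fun a b => a - b) s shifted

-- ===== PRECONDITION & SPEC =====
def Spec_deaccumulate (s : List Int) (out : List Int) : Prop := out = deaccumulate_alt s
instance (s : List Int) (out : List Int) : Decidable (Spec_deaccumulate s out) := by unfold Spec_deaccumulate; infer_instance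

-- ===== CLAIM (what is proved, stated in full; the proofs are below) =====
def Claim_equal_deaccumulate : Prop := ∀ (s : List Int), Dom_deaccumulate s → Spec_deaccumulate s (deaccumulate s)

-- ===== LEMMAS AND PROOFS =====

theorem foldl_if_push {α : Type} (c : Int → Prop) [DecidablePred c] (f g : Int → α)
    (xs : List Int) (init : List α) :
    xs.foldl (fun r i => if c i then r ++ [f i] else r ++ [g i]) init
      = init ++ xs.map (fun i => if c i then f i else g i) := by
  have : (fun (r : List α) i => if c i then r ++ [f i] else r ++ [g i])
       = fun r i => r ++ [if c i then f i else g i] := by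
    funext r i; split <;> rfl
  rw [this, PySem.List.foldl_append_singleton_eq_map]

theorem deacc_main (s : List Int) : deaccumulate s = deaccumulate_alt s := by
  unfold deaccumulate deaccumulate_alt
  rw [PySem.List.slice?_none_none_neg_one]
  simp only [Option.getD_some]
  rw [foldl_if_push, PySem.List.slice?_none_none_neg_one, PySem.List.slice_to_neg_one]
  simp only [Option.getD_some, List.nil_append, PySem.List.pyRange_one, List.map_map,
    List.length_reverse]
  have hN : (((s.length : Int)) - 0).toNat = s.length := by omega
  simp only [hN]
  apply List.ext_getElem
  · simp [Nat.min_def]; omega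
  · intro k h1 h2
    simp only [List.length_reverse, List.length_map, List.length_range] at h1
    rw [List.getElem_reverse, List.getElem_zipWith]
    simp only [List.length_map, List.length_range, List.getElem_map,
      List.getElem_range, Function.comp_apply]
    have hn : k < s.length := by
      simp only [List.length_zipWith] at h2; omega
    by_cases hk : k = 0
    · subst hk
      have hc1 : ((0:Int) + ↑(s.length - 1 - 0) = (s.length : Int) - 1) := by omega
      rw [if_pos hc1]
      simp only [zero_add, PySem.List.pyGetD_natCast, List.getElem_cons_zero]
      rw [List.getD_eq_getElem _ _ (by simp; omega), List.getElem_reverse]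
      have : s.length - 1 - (s.length - 1 - 0) = 0 := by omega
      simp only [Nat.sub_zero, Nat.sub_self]; omega
    · have hc1 : ¬ ((0:Int) + ↑(s.length - 1 - k) = (s.length : Int) - 1) := by omega
      rw [if_neg hc1]
      have e1 : (0:Int) + ↑(s.length - 1 - k) + 1 = ((s.length - k : Nat) : Int) := by omega
      rw [e1]
      simp only [zero_add, PySem.List.pyGetD_natCast]
      rw [List.getD_eq_getElem _ _ (by simp; omega), List.getD_eq_getElem _ _ (by simp; omega),
        List.getElem_reverse, List.getElem_reverse, List.getElem_cons]
      have e2 : s.length - 1 - (s.length - 1 - (s.length - 1 - k)) = s.length - 1 - k := by omega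
      have e3 : s.length - 1 - (s.length - 1 - k) = k := by omega
      have e4 : s.length - 1 - (s.length - 1 - (s.length - k)) = s.length - k := by omega
      have e5 : s.length - 1 - (s.length - k) = k - 1 := by omega
      simp only [e3, e5, dif_neg hk]
      rw [List.getElem_dropLast]

theorem deaccumulate_spec : Claim_equal_deaccumulate := by
  intro s _
  exact deacc_main s
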